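-- pv_equiv track=rewrite | github.com/olesbober/edabit-challenges | sum_of_negative_integers.py | negative_sum
-- ===== SOURCE A (Python) =====
-- def isDigit(c):
--     if ord(c) >= 48 and ord(c) <= 57:
--         return True
--     return False
--
-- def negative_sum(str):
--     str = str+' '
--     negs = []
--     for i, c in enumerate(str):
--         if c == '-':
--             for j in range(i+1,len(str)):
--                 if not isDigit(str[j]):
--                     negs.append(int(str[i:j]))
--                     break
--     return sum(negs)
-- ===== SOURCE B (Python) =====
-- import re
--
-- def negative_sum(str):
--     # Sum every maximal '-<digits>' token; a bare '-' yields int('-') -> ValueError, as in A.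
--     return sum(int(m) for m in re.findall(r'-[0-9]*', str))
-- ===== Notes on version B (the rewrite author's own statement) =====
-- stated objective: idiomatic
-- what changed: Replaced A's index-driven outer loop with a nested forward scan over a sentinel-padded string by a single regex pass: re.findall extracts every dash together with its maximal following ASCII digit run, non-overlapping left to right, and the matches are summed with int.
import Mathlib
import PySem

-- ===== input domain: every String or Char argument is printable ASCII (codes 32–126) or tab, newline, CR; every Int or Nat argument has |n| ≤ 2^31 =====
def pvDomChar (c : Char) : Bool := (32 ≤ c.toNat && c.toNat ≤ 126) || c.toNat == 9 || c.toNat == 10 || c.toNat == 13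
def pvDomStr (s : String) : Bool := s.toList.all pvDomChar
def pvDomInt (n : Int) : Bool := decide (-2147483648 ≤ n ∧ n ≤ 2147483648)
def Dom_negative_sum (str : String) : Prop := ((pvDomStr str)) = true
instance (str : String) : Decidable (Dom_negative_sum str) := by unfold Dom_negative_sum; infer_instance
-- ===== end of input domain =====

-- B replaces A's index-driven double loop by a single tokenising scan (regex findall in Python); objective: idiomatic.

-- ===== PORT A =====
-- isDigit(c)
def pvIsDigit (c : Char) : Bool := if 48 ≤ c.toNat ∧ c.toNat ≤ 57 then true else false

-- inner loop 'for j in range(i+1, len(str)): if not isDigit(str[j]): negs.append(int(str[i:j])); break'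
-- int() is PySem.Int.ofChars?; its 'none' (ValueError) is excluded by Pre_, '.getD 0' is unreachable there
def pvInnerA (cs : List Char) (i : Int) : List Int → List Int → List Int
  | [], negs => negs
  | j :: js, negs =>
    if ¬ (pvIsDigit ((PySem.List.pyGet? cs j).getD ' ') = true) then
      negs ++ [(PySem.Int.ofChars? (PySem.List.slice cs (some i) (some j))).getD 0]
    else pvInnerA cs i js negs

def negative_sum (str : String) : Int :=
  let cs := str.toList ++ [' ']          -- str = str + ' '
  let negs := (PySem.List.enumerate cs).foldl
    (fun negs ic =>
      if ic.2 = '-' then pvInnerA cs ic.1 (PySem.List.pyRange (ic.1 + 1) (cs.length : Int) 1) negs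
      else negs) []
  negs.foldl (· + ·) 0                   -- sum(negs)

-- ===== PORT B =====
-- hand port of re.findall(r'-[0-9]*', s): at each '-' emit '-' plus the following maximal ASCII
-- digit run and resume after it (non-overlapping, left to right); exact for this pattern
def pvTokens : List Char → List (List Char)
  | [] => []
  | c :: rest =>
    if c = '-' then
      let run := rest.takeWhile (fun d => '0' ≤ d ∧ d ≤ '9')
      ('-' :: run) :: pvTokens (rest.drop run.length)
    else pvTokens rest
  termination_by l => l.length
  decreasing_by all_goals simp

def negative_sum_alt (str : String) : Int :=
  -- sum(int(m) for m in …); int's ValueError (bare '-') is outside Pre_, '.getD 0' unreachable there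
  (pvTokens str.toList).foldl (fun acc t => acc + (PySem.Int.ofChars? t).getD 0) 0

-- ===== PRECONDITION & SPEC =====
-- Pre_ excludes exactly the strings containing a '-' not immediately followed by an ASCII digit:
-- there Python A raises ValueError on int('-') (and Python B raises the same way).
def Pre_negative_sum (str : String) : Prop :=
  ∀ i < str.toList.length, str.toList.getD i ' ' = '-' →
    i + 1 < str.toList.length ∧ 48 ≤ (str.toList.getD (i+1) ' ').toNat ∧ (str.toList.getD (i+1) ' ').toNat ≤ 57
instance (str : String) : Decidable (Pre_negative_sum str) := by unfold Pre_negative_sum; infer_instance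
def pvWitness_negative_sum : String := ("3-52 x-1")

def Spec_negative_sum (str : String) (out : Int) : Prop := out = negative_sum_alt str
instance (str : String) (out : Int) : Decidable (Spec_negative_sum str out) := by unfold Spec_negative_sum; infer_instance

-- ===== CLAIM (what is proved, stated in full; the proofs are below) =====
def Claim_equal_negative_sum : Prop := ∀ (str : String), Dom_negative_sum str → Pre_negative_sum str → Spec_negative_sum str (negative_sum str)

-- ===== LEMMAS AND PROOFS =====

-- the common reference sum: for every '-' add int('-' ++ the digit run after it), structurally
def pvVal (t : List Char) : Int :=
  (PySem.Int.ofChars? ('-' :: t.takeWhile (fun d => '0' ≤ d ∧ d ≤ '9'))).getD 0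

def pvS : List Char → Int
  | [] => 0
  | c :: rest => (if c = '-' then pvVal rest else 0) + pvS rest

-- the two digit tests agree
theorem pvIsDigit_eq (c : Char) : pvIsDigit c = decide ('0' ≤ c ∧ c ≤ '9') := by
  have h0 : ('0' ≤ c) ↔ (48 ≤ c.toNat) := by
    rw [Char.le_def, Char.toNat]; exact Iff.rfl
  have h9 : (c ≤ '9') ↔ (c.toNat ≤ 57) := by
    rw [Char.le_def, Char.toNat]; exact Iff.rfl
  by_cases h : 48 ≤ c.toNat ∧ c.toNat ≤ 57
  · simp [pvIsDigit, h, h0.mpr h.1, h9.mpr h.2]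
  · have hn : ¬ ('0' ≤ c ∧ c ≤ '9') := fun hc => h ⟨h0.mp hc.1, h9.mp hc.2⟩
    simp only [pvIsDigit, if_neg h]
    simp [hn]

theorem takeWhile_append_singleton {p : Char → Bool} (xs : List Char) (a : Char)
    (h : p a = false) : (xs ++ [a]).takeWhile p = xs.takeWhile p := by
  induction xs with
  | nil => simp [List.takeWhile, h]
  | cons x xs ih => by_cases hx : p x <;> simp [hx, ih]

theorem take_length_takeWhile {p : Char → Bool} (t : List Char) :
    t.take (t.takeWhile p).length = t.takeWhile p := by
  induction t with
  | nil => simp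
  | cons x xs ih => by_cases hx : p x <;> simp [hx, ih]

theorem foldl_add_shift (l : List Int) (a : Int) :
    l.foldl (· + ·) a = a + l.foldl (· + ·) 0 := by
  induction l generalizing a with
  | nil => simp
  | cons x xs ih => simp only [List.foldl_cons]; rw [ih (a + x), ih (0 + x)]; ring

theorem foldl_tok_shift (l : List (List Char)) (a : Int) :
    l.foldl (fun acc t => acc + (PySem.Int.ofChars? t).getD 0) a
      = a + l.foldl (fun acc t => acc + (PySem.Int.ofChars? t).getD 0) 0 := by
  induction l generalizing a with
  | nil => simp
  | cons x xs ih =>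
    simp only [List.foldl_cons]
    rw [ih (a + _), ih ((0 : Int) + _)]; ring

-- digit-only prefixes contribute nothing to pvS
theorem pvS_digits_append (ds t : List Char) (h : ∀ c ∈ ds, c ≠ '-') :
    pvS (ds ++ t) = pvS t := by
  induction ds with
  | nil => simp
  | cons d ds ih =>
    simp only [List.cons_append, pvS]
    rw [if_neg (by exact fun hd => h d (by simp) hd), ih (fun c hc => h c (by simp [hc]))]
    ring

theorem drop_length_takeWhile {p : Char → Bool} (t : List Char) :
    t.drop (t.takeWhile p).length = t.dropWhile p := by
  induction t with
  | nil => simp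
  | cons x xs ih => by_cases hx : p x <;> simp [hx, ih]

-- B computes pvS
theorem tokens_sum_eq_pvS (xs : List Char) :
    (pvTokens xs).foldl (fun acc t => acc + (PySem.Int.ofChars? t).getD 0) 0 = pvS xs := by
  induction xs using pvTokens.induct with
  | case1 => simp [pvTokens, pvS]
  | case2 rest _run ih =>
    rw [pvTokens]
    rw [if_pos rfl]
    simp only [List.foldl_cons]
    rw [foldl_tok_shift, ih]
    have hrest : pvS rest = pvS (rest.drop _run.length) := by
      conv_lhs => rw [← List.takeWhile_append_dropWhile (p := fun d => decide ('0' ≤ d ∧ d ≤ '9')) (l := rest)]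
      rw [pvS_digits_append]
      · rw [drop_length_takeWhile]
      · intro x hx
        have := List.mem_takeWhile_imp hx
        simp at this
        rintro rfl
        simp at this
    rw [pvS, if_pos rfl, hrest, pvVal]
    ring
  | case3 c rest h ih =>
    rw [pvTokens]
    simp only [if_neg h]
    rw [ih, pvS, if_neg h]
    ring

-- the inner loop of A finds the digit run
theorem innerA_eq (cs' : List Char) (ys : List Char) (k i : Nat) (negs : List Int)
    (hys : cs'.drop k = ys) (hik : i < k)
    (hex : ∃ c ∈ ys, pvIsDigit c = false) :
    pvInnerA cs' (i : Int) (PySem.List.pyRange (k : Int) (cs'.length : Int) 1) negs =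
      negs ++ [(PySem.Int.ofChars?
        ((cs'.drop i).take (k - i + (ys.takeWhile (fun c => pvIsDigit c)).length))).getD 0] := by
  induction ys generalizing k with
  | nil => exact absurd hex (by simp)
  | cons y ys ihy =>
    have hk : k < cs'.length := by
      by_contra hk
      rw [List.drop_eq_nil_of_le (by omega)] at hys
      exact List.cons_ne_nil _ _ hys.symm
    have hget : cs'[k]? = some y := by
      rw [← List.head?_drop, hys]
      rfl
    rw [PySem.List.pyRange_one_cons (by exact_mod_cast hk)]
    rw [pvInnerA]
    have hpg : (PySem.List.pyGet? cs' (k : Int)).getD ' ' = y := by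
      simp [PySem.List.pyGet?_natCast, hget]
    rw [hpg]
    by_cases hy : pvIsDigit y = true
    · rw [if_neg (by simp [hy])]
      have hys' : cs'.drop (k + 1) = ys := by
        have : (cs'.drop k).drop 1 = cs'.drop (k + 1) := by
          rw [List.drop_drop]
        rw [← this, hys]
        simp
      have hex' : ∃ c ∈ ys, pvIsDigit c = false := by
        rcases hex with ⟨c, hc, hcf⟩
        rcases List.mem_cons.mp hc with rfl | hc
        · rw [hy] at hcf; cases hcf
        · exact ⟨c, hc, hcf⟩
      have hcast : (k : Int) + 1 = ((k + 1 : Nat) : Int) := by push_cast; ring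
      rw [hcast, ihy (k + 1) hys' (by omega) hex']
      have harith : k + 1 - i + (ys.takeWhile (fun c => pvIsDigit c)).length
          = k - i + ((y :: ys).takeWhile (fun c => pvIsDigit c)).length := by
        rw [List.takeWhile_cons, if_pos hy]
        simp only [List.length_cons]
        omega
      rw [harith]
    · rw [if_pos (by simp [hy])]
      rw [PySem.List.slice_natCast]
      congr 3
      rw [List.takeWhile_cons]
      simp only [hy]
      simp

-- the outer loop of A computes pvS, over the sentinel-augmented list
theorem outerA_eq (cs : List Char) (t : List Char) (k : Nat) (negs : List Int)
    (hys : (cs ++ [' ']).drop k = t) :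
    (((PySem.List.enumerate t (k : Int)).foldl
        (fun negs ic =>
          if ic.2 = '-' then
            pvInnerA (cs ++ [' ']) ic.1
              (PySem.List.pyRange (ic.1 + 1) ((cs ++ [' ']).length : Int) 1) negs
          else negs) negs).foldl (· + ·) 0)
      = negs.foldl (· + ·) 0 + pvS t := by
  induction t generalizing k negs with
  | nil => simp [PySem.List.enumerate_nil, pvS]
  | cons c t' ih =>
    rw [PySem.List.enumerate_cons]
    simp only [List.foldl_cons]
    have hlen : k < (cs ++ [' ']).length := by
      by_contra hk
      rw [List.drop_eq_nil_of_le (by omega)] at hys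
      exact List.cons_ne_nil _ _ hys.symm
    have hys' : (cs ++ [' ']).drop (k + 1) = t' := by
      have hdd : ((cs ++ [' ']).drop k).drop 1 = (cs ++ [' ']).drop (k + 1) := by
        rw [List.drop_drop]
      rw [← hdd, hys]
      simp
    have hcast : (k : Int) + 1 = ((k + 1 : Nat) : Int) := by push_cast; ring
    by_cases hc : c = '-'
    · rw [if_pos hc]
      -- the dash is inside cs (the sentinel is ' '), so t' still contains the sentinel
      have hkcs : k < cs.length := by
        by_contra hk
        have hk' : k = cs.length := by
          have hl : (cs ++ [' ']).length = cs.length + 1 := by simp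
          omega
        have : (cs ++ [' ']).drop k = [' '] := by
          rw [hk', List.drop_append_of_le_length (le_refl _)]
          simp
        rw [hys] at this
        have : c = ' ' := by
          injection this
        simp [this] at hc
      have htail : t' = cs.drop (k + 1) ++ [' '] := by
        rw [← hys', List.drop_append_of_le_length (by omega)]
      have hex : ∃ x ∈ t', pvIsDigit x = false := by
        refine ⟨' ', ?_, by decide⟩
        rw [htail]
        simp
      rw [hcast, innerA_eq (cs ++ [' ']) t' (k + 1) k negs hys' (by omega) hex]
      rw [ih (k + 1) (negs ++ [_]) hys']
      rw [List.foldl_append, foldl_add_shift [_] (negs.foldl (· + ·) 0)]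
      have hval : (PySem.Int.ofChars?
          (((cs ++ [' ']).drop k).take (k + 1 - k + (t'.takeWhile (fun c => pvIsDigit c)).length))).getD 0
          = pvVal t' := by
        rw [hys]
        have h1 : k + 1 - k + (t'.takeWhile (fun c => pvIsDigit c)).length
            = 1 + (t'.takeWhile (fun c => pvIsDigit c)).length := by omega
        rw [h1]
        have h2 : (c :: t').take (1 + (t'.takeWhile (fun c => pvIsDigit c)).length)
            = c :: t'.take (t'.takeWhile (fun c => pvIsDigit c)).length := by
          rw [Nat.add_comm, List.take_succ_cons]
        rw [h2, take_length_takeWhile, hc, pvVal]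
        have hp : (fun c => pvIsDigit c) = (fun d : Char => decide ('0' ≤ d ∧ d ≤ '9')) := by
          funext d
          exact pvIsDigit_eq d
        rw [hp]
      rw [hval, pvS, if_pos hc]
      simp only [List.foldl_cons, List.foldl_nil]
      ring
    · rw [if_neg hc]
      rw [hcast, ih (k + 1) negs hys']
      rw [pvS, if_neg hc]
      ring

theorem pvS_append_space (xs : List Char) : pvS (xs ++ [' ']) = pvS xs := by
  induction xs with
  | nil => simp [pvS]
  | cons x xs ih =>
    simp only [List.cons_append, pvS, ih]
    congr 1
    by_cases hx : x = '-'
    · rw [if_pos hx, if_pos hx]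
      unfold pvVal
      rw [takeWhile_append_singleton _ _ (by decide)]
    · rw [if_neg hx, if_neg hx]

theorem negative_sum_spec : Claim_equal_negative_sum := by
  intro str _ _
  show negative_sum str = negative_sum_alt str
  simp only [negative_sum, negative_sum_alt]
  have h0 := outerA_eq str.toList (str.toList ++ [' ']) 0 [] (by simp)
  simp only [Nat.cast_zero] at h0
  rw [h0, tokens_sum_eq_pvS, pvS_append_space]
  simp
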